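-- pv_equiv track=rewrite | github.com/DonQueso89/LBCS | ledserver/lbcs/server.py | right_left_zig_zag
-- ===== SOURCE A (Python) =====
-- def _reverse_mapping(columns, rows):
--     reverse_mapping = {}
--     for row in range(rows):
--         for i, col in enumerate(reversed(range(columns))):
--             reverse_mapping[row * columns + i] = row * columns + col
--     return reverse_mapping
--
-- def right_left_zig_zag(columns, rows, mult=1):
--     """Translate a contiguous sequence from top left to bottom right from 0 to n
--     to a reversed zigzag sequence"""
--     reverse_mapping = _reverse_mapping(columns, rows)
--     led_mapping = {}
--     for lednumber in range(columns * rows):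
--         row = lednumber // columns
--         if row % 2 == 0:
--             led_mapping[lednumber] = reverse_mapping[lednumber] * mult
--         else:
--             led_mapping[lednumber] = reverse_mapping[(row + 1) * columns - (lednumber % columns) - 1] * mult
--     return led_mapping
-- ===== SOURCE B (Python) =====
-- def right_left_zig_zag(columns, rows, mult=1):
--     """Translate a contiguous sequence from top left to bottom right from 0 to n
--     to a reversed zigzag sequence"""
--     led_mapping = {}
--     for lednumber in range(columns * rows):
--         row = lednumber // columns
--         c = lednumber % columns
--         if row % 2 == 0:
--             led_mapping[lednumber] = (row * columns + columns - 1 - c) * mult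
--         else:
--             led_mapping[lednumber] = lednumber * mult
--     return led_mapping
-- ===== Notes on version B (the rewrite author's own statement) =====
-- stated objective: simpler
-- what changed: Drops the _reverse_mapping helper and its intermediate table entirely: one pass over range(columns*rows) computes each entry in closed form (reversed column for even rows, identity for odd rows) instead of building a dict and looking it up twice.
import Mathlib
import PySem

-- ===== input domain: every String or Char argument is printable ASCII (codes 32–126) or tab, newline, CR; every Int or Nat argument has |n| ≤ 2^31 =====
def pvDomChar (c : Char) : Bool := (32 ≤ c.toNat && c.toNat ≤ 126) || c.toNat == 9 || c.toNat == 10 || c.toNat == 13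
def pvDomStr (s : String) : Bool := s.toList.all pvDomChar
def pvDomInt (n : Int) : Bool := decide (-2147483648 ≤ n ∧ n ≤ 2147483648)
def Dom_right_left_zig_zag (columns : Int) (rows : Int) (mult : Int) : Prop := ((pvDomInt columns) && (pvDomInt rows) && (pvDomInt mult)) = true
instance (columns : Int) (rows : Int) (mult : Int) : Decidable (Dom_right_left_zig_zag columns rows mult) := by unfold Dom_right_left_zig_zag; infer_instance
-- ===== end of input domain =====

-- B replaces A's intermediate _reverse_mapping dict by a closed-form per-entry computation in a single pass (objective: simpler).

-- ===== PORT A =====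
def pvReverseMapping (columns : Int) (rows : Int) : PySem.Dict Int Int :=
  (PySem.List.pyRange 0 rows 1).foldl (fun rm row =>
    (PySem.List.enumerate ((PySem.List.pyRange 0 columns 1).reverse) 0).foldl
      (fun rm p => rm.insert (row * columns + p.1) (row * columns + p.2)) rm)
    PySem.Dict.empty

-- reverse_mapping[x] raises KeyError when x is missing; that happens exactly outside Pre_, where the port reads default 0
def right_left_zig_zag (columns : Int) (rows : Int) (mult : Int) : List (Int × Int) :=
  let reverse_mapping := pvReverseMapping columns rows
  ((PySem.List.pyRange 0 (columns * rows) 1).foldl (fun led_mapping lednumber =>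
    if PySem.Int.mod (PySem.Int.floordiv lednumber columns) 2 == 0 then
      led_mapping.insert lednumber (reverse_mapping.getD lednumber 0 * mult)
    else
      led_mapping.insert lednumber
        (reverse_mapping.getD
          ((PySem.Int.floordiv lednumber columns + 1) * columns - PySem.Int.mod lednumber columns - 1) 0 * mult))
    PySem.Dict.empty).items

-- ===== PORT B =====
def right_left_zig_zag_alt (columns : Int) (rows : Int) (mult : Int) : List (Int × Int) :=
  ((PySem.List.pyRange 0 (columns * rows) 1).foldl (fun led_mapping lednumber =>
    if PySem.Int.mod (PySem.Int.floordiv lednumber columns) 2 == 0 then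
      led_mapping.insert lednumber
        ((PySem.Int.floordiv lednumber columns * columns + columns - 1 - PySem.Int.mod lednumber columns) * mult)
    else
      led_mapping.insert lednumber (lednumber * mult))
    PySem.Dict.empty).items

-- ===== PRECONDITION & SPEC =====
-- Pre_ excludes only inputs where A RAISES: with columns < 0 and rows < 0 the product is positive, the
-- main loop runs, but _reverse_mapping is empty, so A raises KeyError on the first iteration.
def Pre_right_left_zig_zag (columns : Int) (rows : Int) (mult : Int) : Prop := ¬ (columns < 0 ∧ rows < 0)
instance (columns : Int) (rows : Int) (mult : Int) : Decidable (Pre_right_left_zig_zag columns rows mult) := by unfold Pre_right_left_zig_zag; infer_instance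
def pvWitness_right_left_zig_zag : Int × Int × Int := (3, 2, 1)

def Spec_right_left_zig_zag (columns : Int) (rows : Int) (mult : Int) (out : List (Int × Int)) : Prop := out = right_left_zig_zag_alt columns rows mult
instance (columns : Int) (rows : Int) (mult : Int) (out : List (Int × Int)) : Decidable (Spec_right_left_zig_zag columns rows mult out) := by unfold Spec_right_left_zig_zag; infer_instance

-- ===== CLAIM (what is proved, stated in full; the proofs are below) =====
def Claim_equal_right_left_zig_zag : Prop := ∀ (columns : Int) (rows : Int) (mult : Int), Dom_right_left_zig_zag columns rows mult → Pre_right_left_zig_zag columns rows mult → Spec_right_left_zig_zag columns rows mult (right_left_zig_zag columns rows mult)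

-- ===== LEMMAS AND PROOFS =====

-- quotient/remainder of row*c + j for 0 ≤ j < c
theorem pv_fd_md (c r j : Int) (hc : 0 < c) (h0 : 0 ≤ j) (hj : j < c) :
    PySem.Int.floordiv (r * c + j) c = r ∧ PySem.Int.mod (r * c + j) c = j := by
  rw [PySem.Int.floordiv_eq_ediv_of_pos hc, PySem.Int.mod_eq_emod_of_pos hc]
  constructor
  · rw [add_comm, Int.add_mul_ediv_right _ _ (by omega : c ≠ 0),
      Int.ediv_eq_zero_of_lt h0 hj]
    ring
  · rw [add_comm, mul_comm r c, Int.add_mul_emod_self_left]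
    exact Int.emod_eq_of_lt h0 hj

-- the table A builds: items are exactly (k, (k // c)*c + (c - 1 - k % c)) for k = 0 .. r*c - 1, in order
theorem pv_rm_items (c : Int) (hc : 0 < c) :
    ∀ (r : Int), 0 ≤ r →
      (pvReverseMapping c r).items
        = (PySem.List.pyRange 0 (r * c) 1).map
            (fun k => (k, PySem.Int.floordiv k c * c + (c - 1 - PySem.Int.mod k c))) := by
  intro r hr
  induction r, hr using Int.le_induction with
  | base =>
      simp only [pvReverseMapping, PySem.List.pyRange_one_eq_nil (by omega : (0:Int) ≤ 0),
        List.foldl_nil]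
      rw [PySem.List.pyRange_one_eq_nil (by omega : 0 * c ≤ 0)]
      rfl
  | succ r hr ih =>
      have hstep : PySem.List.pyRange 0 (r + 1) 1 = PySem.List.pyRange 0 r 1 ++ [r] :=
        PySem.List.pyRange_one_succ_right (by omega)
      have hprev : pvReverseMapping c (r + 1)
          = (PySem.List.enumerate ((PySem.List.pyRange 0 c 1).reverse) 0).foldl
              (fun rm p => rm.insert (r * c + p.1) (r * c + p.2)) (pvReverseMapping c r) := by
        simp [pvReverseMapping, hstep, List.foldl_append]
      rw [hprev]
      have hkeys : (pvReverseMapping c r).keys = PySem.List.pyRange 0 (r * c) 1 := by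
        show (pvReverseMapping c r).items.map (·.1) = _
        rw [ih]
        simp [List.map_map, Function.comp_def]
      have hfresh : ∀ a ∈ PySem.List.enumerate ((PySem.List.pyRange 0 c 1).reverse) 0,
          (pvReverseMapping c r).contains (r * c + a.1) = false := by
        intro a ha
        rcases (PySem.List.mem_enumerate_iff _ _ _).mp ha with ⟨k, hk, rfl⟩
        rw [PySem.Dict.contains_eq_decide_mem_keys, hkeys]
        simp only [decide_eq_false_iff_not, PySem.List.mem_pyRange_one]
        intro hmem
        have : (0:Int) ≤ (k : Int) := by positivity
        omega
      have hlenrev : ((PySem.List.pyRange 0 c 1).reverse).length = c.toNat := by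
        simp [PySem.List.length_pyRange_one]
      have hnodup : ((PySem.List.enumerate ((PySem.List.pyRange 0 c 1).reverse) 0).map
          (fun a => r * c + a.1)).Nodup := by
        have h1 : (PySem.List.enumerate ((PySem.List.pyRange 0 c 1).reverse) 0).map (·.1)
            = PySem.List.pyRange 0 (0 + ((PySem.List.pyRange 0 c 1).reverse).length) 1 :=
          PySem.List.map_fst_enumerate _ _
        have : (PySem.List.enumerate ((PySem.List.pyRange 0 c 1).reverse) 0).map
            (fun a => r * c + a.1)
            = ((PySem.List.enumerate ((PySem.List.pyRange 0 c 1).reverse) 0).map (·.1)).map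
                (fun x => r * c + x) := by
          simp [List.map_map, Function.comp_def]
        rw [this, h1]
        exact (PySem.List.nodup_pyRange_one _ _).map (fun a b h => by omega)
      rw [PySem.Dict.items_foldl_insert_fresh _ _ _ _ hfresh hnodup, ih]
      have hsplit : PySem.List.pyRange 0 ((r + 1) * c) 1
          = PySem.List.pyRange 0 (r * c) 1 ++ PySem.List.pyRange (r * c) ((r + 1) * c) 1 :=
        PySem.List.pyRange_one_append 0 (r * c) ((r + 1) * c) (by positivity) (by nlinarith)
      rw [hsplit, List.map_append]
      congr 1
      apply List.ext_getElem
      · rw [List.length_map, List.length_map, PySem.List.length_enumerate, hlenrev,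
          PySem.List.length_pyRange_one, show (r + 1) * c - r * c = c by ring]
      · intro j hj1 hj2
        have hjc : j < c.toNat := by
          simpa [PySem.List.length_enumerate, hlenrev] using hj1
        have hrev : ((PySem.List.pyRange 0 c 1).reverse)[j]'(by omega)
            = (0 : Int) + ((c.toNat - 1 - j : Nat) : Int) := by
          rw [List.getElem_reverse]
          have := PySem.List.getElem_pyRange_one 0 c (((PySem.List.pyRange 0 c 1).length - 1 - j))
            (by simp [PySem.List.length_pyRange_one]; omega)
          simpa [PySem.List.length_pyRange_one] using this
        simp only [List.getElem_map, PySem.List.getElem_enumerate, hrev,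
          PySem.List.getElem_pyRange_one]
        have hcast : ((c.toNat - 1 - j : Nat) : Int) = c - 1 - (j : Int) := by omega
        have hfm := pv_fd_md c r (j : Int) hc (by positivity) (by omega)
        simp only [zero_add, hcast]
        rw [hfm.1, hfm.2]

theorem pv_rm_getD (c r : Int) (hc : 0 < c) (hr : 0 ≤ r) (k : Int)
    (h0 : 0 ≤ k) (hk : k < r * c) :
    (pvReverseMapping c r).getD k 0
      = PySem.Int.floordiv k c * c + (c - 1 - PySem.Int.mod k c) := by
  apply PySem.Dict.getD_of_mem_items
  · rw [pv_rm_items c hc r hr]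
    exact List.mem_map_of_mem (PySem.List.mem_pyRange_one.mpr ⟨h0, hk⟩)
  · show ((pvReverseMapping c r).items.map (·.1)).Nodup
    rw [pv_rm_items c hc r hr]
    simpa [List.map_map, Function.comp_def] using PySem.List.nodup_pyRange_one 0 (r * c)

-- ===== VERDICT (by name: the statement is the Claim_ definition above) =====
theorem right_left_zig_zag_spec : Claim_equal_right_left_zig_zag := by
  intro c r m _ hpre
  unfold Spec_right_left_zig_zag right_left_zig_zag right_left_zig_zag_alt
  dsimp only
  by_cases hpos : 0 < c * r
  · have hcr : 0 < c ∧ 0 < r := by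
      rcases mul_pos_iff.mp hpos with h | h
      · exact h
      · exact absurd h hpre
    obtain ⟨hc, hr⟩ := hcr
    congr 1
    apply PySem.List.foldl_congr_mem
    intro d led hled
    rw [PySem.List.mem_pyRange_one] at hled
    obtain ⟨hled0, hledlt⟩ := hled
    have hcc0 : 0 ≤ PySem.Int.mod led c := PySem.Int.mod_nonneg led hc
    have hccc : PySem.Int.mod led c < c := PySem.Int.mod_lt led hc
    have hsum : PySem.Int.floordiv led c * c + PySem.Int.mod led c = led :=
      PySem.Int.floordiv_mul_add_mod led c
    have hrow0 : 0 ≤ PySem.Int.floordiv led c := by nlinarith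
    have hrowlt : PySem.Int.floordiv led c < r := by nlinarith [mul_comm c r]
    split
    · -- even row: reverse_mapping[led] is the closed form
      rw [pv_rm_getD c r hc (le_of_lt hr) led hled0 (by rw [mul_comm] at hledlt; exact hledlt)]
      ring_nf
    · -- odd row: reverse_mapping[(row+1)*c - led%c - 1] = led
      have hkey : (PySem.Int.floordiv led c + 1) * c - PySem.Int.mod led c - 1
          = PySem.Int.floordiv led c * c + (c - 1 - PySem.Int.mod led c) := by ring
      have hfm := pv_fd_md c (PySem.Int.floordiv led c) (c - 1 - PySem.Int.mod led c) hc
        (by omega) (by omega)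
      rw [hkey, pv_rm_getD c r hc (le_of_lt hr) _ (by nlinarith) (by nlinarith)]
      rw [hfm.1, hfm.2]
      have : PySem.Int.floordiv led c * c + (c - 1 - (c - 1 - PySem.Int.mod led c)) = led := by
        omega
      rw [this]
  · have hnil : PySem.List.pyRange 0 (c * r) 1 = [] :=
      PySem.List.pyRange_one_eq_nil (by omega)
    rw [hnil]
    rfl
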